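-- pv_equiv track=rewrite | github.com/NKalavros/scMEDALTpy | src/tree_utils.py | distcalc
-- ===== SOURCE A (Python) =====
-- import copy
--
-- def distcalc(node1, node2):
--     """Calculate distance between two chromosome segments."""
--     assert len(node1) == len(node2)
--
--     if len(node1) == 1:
--         return abs(node1[0] - node2[0])
--
--     d = 0
--     newlist = copy.deepcopy(node1)
--
--     for i in range(len(node2)):
--         newlist[i] -= node2[i]
--
--     while newlist:
--         if newlist[0] == 0:
--             newlist.pop(0)
--         elif newlist[0] > 0:
--             k = 0
--             for i in range(len(newlist)):
--                 if newlist[i] > 0: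
--                     k = i
--                 else:
--                     break
--             for i in range(k + 1):
--                 newlist[i] -= 1
--             d += 1
--         elif newlist[0] < 0:
--             k = 0
--             for i in range(len(newlist)):
--                 if newlist[i] < 0:
--                     k = i
--                 else:
--                     break
--             for i in range(k + 1):
--                 newlist[i] += 1
--             d += 1
--
--     return abs(d)
-- ===== SOURCE B (Python) =====
-- def distcalc(node1, node2):
--     """Calculate distance between two chromosome segments."""
--     assert len(node1) == len(node2)
--     d = 0
--     prev = 0
--     for x, y in zip(node1, node2):
--         a = x - y
--         if a * prev > 0:
--             d += max(abs(a) - abs(prev), 0)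
--         else:
--             d += abs(a)
--         prev = a
--     return d
-- ===== Notes on version B (the rewrite author's own statement) =====
-- stated objective: faster
-- what changed: Replaced the repeated greedy pop/decrement-prefix sweeps over a mutable difference list with a single left-to-right pass that adds, for each difference, its full magnitude or only the same-sign excess over the previous difference (closed form for the prefix ±1 operation count).
import Mathlib
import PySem

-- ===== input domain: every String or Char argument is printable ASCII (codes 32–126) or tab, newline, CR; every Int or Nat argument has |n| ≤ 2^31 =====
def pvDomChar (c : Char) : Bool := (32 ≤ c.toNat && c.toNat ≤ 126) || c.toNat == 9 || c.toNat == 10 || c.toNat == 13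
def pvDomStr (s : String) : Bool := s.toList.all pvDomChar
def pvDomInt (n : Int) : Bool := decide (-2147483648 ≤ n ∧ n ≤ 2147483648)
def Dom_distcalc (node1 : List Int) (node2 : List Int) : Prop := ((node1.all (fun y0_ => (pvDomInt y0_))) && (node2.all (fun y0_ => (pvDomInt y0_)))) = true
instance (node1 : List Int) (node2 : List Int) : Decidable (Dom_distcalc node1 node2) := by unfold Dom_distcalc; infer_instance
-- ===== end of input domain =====

-- B replaces A's repeated greedy ±1 prefix sweeps (O(n·M)) with a single-pass
-- closed form over adjacent differences (O(n)); equivalence proved below.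
-- Pre_ excludes only length mismatch, where A's assert raises AssertionError.

-- ===== PORT A =====

-- A's inner scan "k = last index of the leading >0 run" (so k+1 = run length)
def posRun : List Int → Nat
  | [] => 0
  | a :: t => if a > 0 then posRun t + 1 else 0

def negRun : List Int → Nat
  | [] => 0
  | a :: t => if a < 0 then negRun t + 1 else 0

-- "for i in range(k+1): newlist[i] -= 1" : subtract 1 from the first n entries
def decFirst : Nat → List Int → List Int
  | 0, l => l
  | _ + 1, [] => []
  | n + 1, a :: t => (a - 1) :: decFirst n t

def incFirst : Nat → List Int → List Int
  | 0, l => l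
  | _ + 1, [] => []
  | n + 1, a :: t => (a + 1) :: incFirst n t

def sumAbs (l : List Int) : Nat := (l.map Int.natAbs).sum

theorem length_decFirst (n : Nat) (l : List Int) : (decFirst n l).length = l.length := by
  induction n generalizing l with
  | zero => simp [decFirst]
  | succ m ih => cases l <;> simp [decFirst, ih]

theorem length_incFirst (n : Nat) (l : List Int) : (incFirst n l).length = l.length := by
  induction n generalizing l with
  | zero => simp [incFirst]
  | succ m ih => cases l <;> simp [incFirst, ih]

theorem sumAbs_decFirst_posRun (l : List Int) :
    sumAbs (decFirst (posRun l) l) ≤ sumAbs l ∧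
    (∀ a t, l = a :: t → a > 0 → sumAbs (decFirst (posRun l) l) < sumAbs l) := by
  induction l with
  | nil => exact ⟨le_refl _, by intro a t h; cases h⟩
  | cons a t ih =>
    by_cases ha : a > 0
    · have h1 : (a - 1).natAbs < a.natAbs := by omega
      constructor
      · simp only [posRun, if_pos ha, decFirst, sumAbs, List.map_cons, List.sum_cons]
        exact Nat.add_le_add (le_of_lt h1) ih.1
      · intro a' t' h _
        simp only [posRun, if_pos ha, decFirst, sumAbs, List.map_cons, List.sum_cons]
        exact Nat.add_lt_add_of_lt_of_le h1 ih.1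
    · constructor
      · simp [posRun, if_neg ha, decFirst]
      · intro a' t' h hgt
        cases h; exact absurd hgt ha

theorem sumAbs_incFirst_negRun (l : List Int) :
    sumAbs (incFirst (negRun l) l) ≤ sumAbs l ∧
    (∀ a t, l = a :: t → a < 0 → sumAbs (incFirst (negRun l) l) < sumAbs l) := by
  induction l with
  | nil => exact ⟨le_refl _, by intro a t h; cases h⟩
  | cons a t ih =>
    by_cases ha : a < 0
    · have h1 : (a + 1).natAbs < a.natAbs := by omega
      constructor
      · simp only [negRun, if_pos ha, incFirst, sumAbs, List.map_cons, List.sum_cons]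
        exact Nat.add_le_add (le_of_lt h1) ih.1
      · intro a' t' h _
        simp only [negRun, if_pos ha, incFirst, sumAbs, List.map_cons, List.sum_cons]
        exact Nat.add_lt_add_of_lt_of_le h1 ih.1
    · constructor
      · simp [negRun, if_neg ha, incFirst]
      · intro a' t' h hlt
        cases h; exact absurd hlt ha

-- the while loop of A: l is `newlist`, d the counter
def aloop : List Int → Int → Int
  | [], d => d
  | a :: t, d =>
    if a = 0 then aloop t d
    else if a > 0 then aloop (decFirst (posRun (a :: t)) (a :: t)) (d + 1)
    else aloop (incFirst (negRun (a :: t)) (a :: t)) (d + 1)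
termination_by l _ => sumAbs l + l.length
decreasing_by
  · simp [sumAbs]; omega
  · have := (sumAbs_decFirst_posRun (a :: t)).2 a t rfl (by omega)
    have hl := length_decFirst (posRun (a :: t)) (a :: t)
    omega
  · have := (sumAbs_incFirst_negRun (a :: t)).2 a t rfl (by omega)
    have hl := length_incFirst (negRun (a :: t)) (a :: t)
    omega

def distcalc (node1 : List Int) (node2 : List Int) : Int :=
  -- assert len(node1) == len(node2): raises outside Pre_; value below is only
  -- claimed on Pre_
  if node1.length = 1 then
    |((node1.headI) - (node2.headI))|
  else
    |aloop (List.zipWith (fun x y => x - y) node1 node2) 0|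

-- ===== PORT B =====

def bstep (dp : Int × Int) (xy : Int × Int) : Int × Int :=
  let a := xy.1 - xy.2
  (dp.1 + (if a * dp.2 > 0 then max (|a| - |dp.2|) 0 else |a|), a)

def distcalc_alt (node1 : List Int) (node2 : List Int) : Int :=
  (((node1.zip node2).foldl bstep (0, 0))).1

-- ===== PRECONDITION & SPEC =====
-- Pre_ excludes exactly the inputs where A's `assert` raises AssertionError.
def Pre_distcalc (node1 : List Int) (node2 : List Int) : Prop :=
  node1.length = node2.length
instance (node1 : List Int) (node2 : List Int) : Decidable (Pre_distcalc node1 node2) := by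
  unfold Pre_distcalc; infer_instance

def pvWitness_distcalc : List Int × List Int := ([3, 1, -2, 0, 4], [1, 1, 2, 0, 1])

def Spec_distcalc (node1 : List Int) (node2 : List Int) (out : Int) : Prop := out = distcalc_alt node1 node2
instance (node1 : List Int) (node2 : List Int) (out : Int) : Decidable (Spec_distcalc node1 node2 out) := by unfold Spec_distcalc; infer_instance

-- ===== CLAIM (what is proved, stated in full; the proofs are below) =====
def Claim_equal_distcalc : Prop := ∀ (node1 : List Int) (node2 : List Int), Dom_distcalc node1 node2 → Pre_distcalc node1 node2 → Spec_distcalc node1 node2 (distcalc node1 node2)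

-- ===== LEMMAS AND PROOFS =====

def contrib (prev a : Int) : Int := if a * prev > 0 then max (|a| - |prev|) 0 else |a|

def G : Int → List Int → Int
  | _, [] => 0
  | prev, a :: t => contrib prev a + G a t

theorem contrib_nonneg (prev a : Int) : 0 ≤ contrib prev a := by
  unfold contrib; split
  · exact le_max_right _ _
  · exact abs_nonneg a

theorem G_nonneg (prev : Int) (l : List Int) : 0 ≤ G prev l := by
  induction l generalizing prev with
  | nil => simp [G]
  | cons a t ih => have := contrib_nonneg prev a; simp only [G]; have := ih a; omega

theorem contrib_nn (prev a : Int) (hp : 0 ≤ prev) (ha : 0 ≤ a) :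
    contrib prev a = max (a - prev) 0 := by
  unfold contrib; split <;> rename_i h
  · rw [abs_of_nonneg ha, abs_of_nonneg hp]
  · rcases lt_or_eq_of_le hp with hp' | hp'
    · rcases lt_or_eq_of_le ha with ha' | ha'
      · exact absurd (mul_pos ha' hp') h
      · simp [← ha', abs_of_nonneg, le_of_lt hp']
    · rw [abs_of_nonneg ha]; omega

theorem contrib_np (prev a : Int) (hp : 0 ≤ prev) (ha : a ≤ 0) :
    contrib prev a = |a| := by
  unfold contrib; split <;> rename_i h
  · exact absurd h (by nlinarith)
  · rfl

theorem contrib_pn (prev a : Int) (hp : prev ≤ 0) (ha : 0 ≤ a) :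
    contrib prev a = |a| := by
  unfold contrib; split <;> rename_i h
  · exact absurd h (by nlinarith)
  · rfl

theorem contrib_pp (prev a : Int) (hp : prev ≤ 0) (ha : a ≤ 0) :
    contrib prev a = max (prev - a) 0 := by
  unfold contrib; split <;> rename_i h
  · rw [abs_of_nonpos ha, abs_of_nonpos hp]; omega
  · have h0 : a = 0 ∨ prev = 0 := by
      by_contra hc
      rw [not_or] at hc
      exact h (mul_pos_of_neg_of_neg (by omega) (by omega))
    rw [abs_of_nonpos ha]
    omega

-- decrementing the leading positive run shifts G's state in lockstep
theorem G_decFirst (l : List Int) : ∀ p : Int, 1 ≤ p →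
    G (p - 1) (decFirst (posRun l) l) = G p l := by
  induction l with
  | nil => intro p _; simp [posRun, decFirst, G]
  | cons a t ih =>
    intro p hp
    by_cases ha : a > 0
    · simp only [posRun, if_pos ha, decFirst, G]
      have h1 : contrib (p - 1) (a - 1) = contrib p a := by
        rw [contrib_nn _ _ (by omega) (by omega), contrib_nn _ _ (by omega) (by omega)]
        congr 1; omega
      have h2 : G (a - 1) (decFirst (posRun t) t) = G a t := ih a (by omega)
      rw [h1, h2]
    · simp only [posRun, if_neg ha, decFirst, G]
      have h1 : contrib (p - 1) a = contrib p a := by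
        rw [contrib_np _ _ (by omega) (by omega), contrib_np _ _ (by omega) (by omega)]
      rw [h1]

theorem G_incFirst (l : List Int) : ∀ p : Int, p ≤ -1 →
    G (p + 1) (incFirst (negRun l) l) = G p l := by
  induction l with
  | nil => intro p _; simp [negRun, incFirst, G]
  | cons a t ih =>
    intro p hp
    by_cases ha : a < 0
    · simp only [negRun, if_pos ha, incFirst, G]
      have h1 : contrib (p + 1) (a + 1) = contrib p a := by
        rw [contrib_pp _ _ (by omega) (by omega), contrib_pp _ _ (by omega) (by omega)]
        congr 1; omega
      have h2 : G (a + 1) (incFirst (negRun t) t) = G a t := ih a (by omega)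
      rw [h1, h2]
    · simp only [negRun, if_neg ha, incFirst, G]
      have h1 : contrib (p + 1) a = contrib p a := by
        rw [contrib_pn _ _ (by omega) (by omega), contrib_pn _ _ (by omega) (by omega)]
      rw [h1]

theorem aloop_eq_G : ∀ (l : List Int) (d : Int), aloop l d = d + G 0 l := by
  intro l d
  induction l, d using aloop.induct with
  | case1 d => simp [aloop, G]
  | case2 t d ih =>
    simp only [aloop, ih, G, contrib_np 0 0 le_rfl le_rfl]
    simp
  | case3 a t d ha hgt ih =>
    rw [aloop, if_neg ha, if_pos hgt, ih]
    have hrun : posRun (a :: t) = posRun t + 1 := by rw [posRun, if_pos hgt]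
    have : G 0 (decFirst (posRun (a :: t)) (a :: t)) = G 0 (a :: t) - 1 := by
      rw [hrun]
      show G 0 ((a - 1) :: decFirst (posRun t) t) = G 0 (a :: t) - 1
      simp only [G]
      rw [contrib_nn 0 (a - 1) le_rfl (by omega), contrib_nn 0 a le_rfl (by omega),
        G_decFirst t a (by omega)]
      omega
    rw [this]; ring
  | case4 a t d ha hgt ih =>
    rw [aloop, if_neg ha, if_neg hgt, ih]
    have hlt : a < 0 := by omega
    have hrun : negRun (a :: t) = negRun t + 1 := by rw [negRun, if_pos hlt]
    have : G 0 (incFirst (negRun (a :: t)) (a :: t)) = G 0 (a :: t) - 1 := by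
      rw [hrun]
      show G 0 ((a + 1) :: incFirst (negRun t) t) = G 0 (a :: t) - 1
      simp only [G]
      rw [contrib_pp 0 (a + 1) le_rfl (by omega), contrib_pp 0 a le_rfl (by omega),
        G_incFirst t a (by omega)]
      omega
    rw [this]; ring

theorem foldl_bstep (l : List (Int × Int)) : ∀ d prev : Int,
    (l.foldl bstep (d, prev)).1 = d + G prev (l.map (fun xy => xy.1 - xy.2)) := by
  induction l with
  | nil => intro d prev; simp [G]
  | cons xy t ih =>
    intro d prev
    simp only [List.foldl_cons, List.map_cons, G, bstep, ih]
    unfold contrib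
    ring

theorem zip_map_sub (n1 n2 : List Int) :
    (n1.zip n2).map (fun xy => xy.1 - xy.2) = List.zipWith (fun x y => x - y) n1 n2 := by
  rw [List.zip, List.map_zipWith]

theorem distcalc_alt_eq_G (n1 n2 : List Int) :
    distcalc_alt n1 n2 = G 0 (List.zipWith (fun x y => x - y) n1 n2) := by
  unfold distcalc_alt
  rw [foldl_bstep, zip_map_sub]; ring

-- ===== VERDICT (by name: the statement is the Claim_ definition above) =====
theorem distcalc_spec : Claim_equal_distcalc := by
  intro n1 n2 _ hpre
  unfold Spec_distcalc distcalc
  rw [distcalc_alt_eq_G]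
  by_cases h1 : n1.length = 1
  · rw [if_pos h1]
    unfold Pre_distcalc at hpre
    match n1, n2, h1, hpre with
    | [a], [b], _, _ =>
      simp [List.zipWith, G, contrib, List.headI]
  · rw [if_neg h1, aloop_eq_G, zero_add,
      abs_of_nonneg (G_nonneg 0 (List.zipWith (fun x y => x - y) n1 n2))]
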